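-- pv_equiv track=rewrite | github.com/Iskan9/Game | Game.py | transfer0_left
-- ===== SOURCE A (Python) =====
-- def transfer0_left(mat):  # перенос нулей влево
--     flag = False
--     new = [[0] * len(mat) for _ in range(len(mat))]
--     for i in range(len(mat)):
--         row_non_zero = [mat[i][j] for j in range(len(mat[i])) if mat[i][j] != 0]
--         count_0 = len(mat[i]) - len(row_non_zero)
--         for k in range(count_0):
--             row_non_zero.insert(0, 0)  # вставить в нулевую позицию 0
--         new[i] = row_non_zero
--     if mat != new:
--         flag = True
--     return (new, flag)
-- ===== SOURCE B (Python) =====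
-- def transfer0_left(mat):  # zeros to the left via a stable sort on the zero predicate
--     new = [sorted(row, key=lambda x: x != 0) for row in mat]
--     return (new, mat != new)
-- ===== Notes on version B (the rewrite author's own statement) =====
-- stated objective: idiomatic
-- what changed: Replaced the per-row filter-count-and-prepend loops (plus the preallocated square matrix and index-based assignment) with a one-line stable sort of each row by the key x != 0, which moves zeros first while keeping nonzeros in order; the flag is the direct comparison mat != new.
import Mathlib
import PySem

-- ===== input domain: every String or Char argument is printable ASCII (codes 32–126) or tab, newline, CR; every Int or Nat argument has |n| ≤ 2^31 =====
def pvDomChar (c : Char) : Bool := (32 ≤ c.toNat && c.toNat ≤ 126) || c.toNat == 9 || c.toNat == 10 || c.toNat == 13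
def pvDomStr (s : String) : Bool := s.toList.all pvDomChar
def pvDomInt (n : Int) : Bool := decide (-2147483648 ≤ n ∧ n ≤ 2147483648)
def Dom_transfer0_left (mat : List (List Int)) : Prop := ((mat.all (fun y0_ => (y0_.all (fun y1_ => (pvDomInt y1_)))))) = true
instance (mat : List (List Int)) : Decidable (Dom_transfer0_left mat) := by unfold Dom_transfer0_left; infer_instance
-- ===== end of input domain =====

-- B replaces A's per-row filter/count/prepend loops and scratch square matrix with a
-- stable per-row sort on the key (x != 0) — idiomatic, not claimed faster.

-- ===== PORT A =====
def transfer0_left (mat : List (List Int)) : List (List Int) × Bool :=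
  let flag := false
  let new0 : List (List Int) :=
    List.replicate mat.length (List.replicate mat.length (0 : Int))
  let new := (PySem.List.pyRange 0 (PySem.List.len mat) 1).foldl (fun acc i =>
    let row := PySem.List.pyGetD mat i []
    let row_non_zero := (PySem.List.pyRange 0 (PySem.List.len row) 1).foldl
      (fun r j => if PySem.List.pyGetD row j 0 ≠ 0 then r ++ [PySem.List.pyGetD row j 0] else r) []
    let count0 : Int := PySem.List.len row - PySem.List.len row_non_zero
    let rz := (PySem.List.pyRange 0 count0 1).foldl
      (fun r _ => PySem.List.insert r 0 0) row_non_zero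
    acc.set i.toNat rz) new0
  let flag := if mat ≠ new then true else flag
  (new, flag)

-- ===== PORT B =====
def transfer0_left_alt (mat : List (List Int)) : List (List Int) × Bool :=
  let new := mat.map (fun row => PySem.List.sorted row (fun x => decide (x ≠ 0)) false)
  (new, decide (mat ≠ new))

-- ===== PRECONDITION & SPEC =====
def Spec_transfer0_left (mat : List (List Int)) (out : List (List Int) × Bool) : Prop := out = transfer0_left_alt mat
instance (mat : List (List Int)) (out : List (List Int) × Bool) : Decidable (Spec_transfer0_left mat out) := by unfold Spec_transfer0_left; infer_instance

-- ===== CLAIM (what is proved, stated in full; the proofs are below) =====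
def Claim_equal_transfer0_left : Prop := ∀ (mat : List (List Int)), Dom_transfer0_left mat → Spec_transfer0_left mat (transfer0_left mat)

-- ===== LEMMAS AND PROOFS =====

-- inserting x skips a prefix it is not "before"
theorem pv_insertBy_append (bf : Int → Int → Bool) (x : Int) (zs ns : List Int)
    (h : ∀ z ∈ zs, bf x z = false) :
    PySem.List.insertBy bf x (zs ++ ns) = zs ++ PySem.List.insertBy bf x ns := by
  induction zs with
  | nil => simp
  | cons z t ih =>
    have hz : bf x z = false := h z (by simp)
    simp [PySem.List.insertBy, hz, ih (fun a ha => h a (by simp [ha]))]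

-- invariant of the insertion-sort fold with the two-valued key (x ≠ 0)
theorem pv_sort_inv (xs : List Int) : ∀ (zs ns : List Int),
    (∀ z ∈ zs, z = 0) → (∀ n ∈ ns, n ≠ 0) →
    xs.foldl (fun acc x =>
      PySem.List.insertBy (fun a b => decide ((decide (a ≠ 0)) < (decide (b ≠ 0)))) x acc) (zs ++ ns)
    = (zs ++ xs.filter (fun x => decide (x = 0))) ++ (ns ++ xs.filter (fun x => decide (x ≠ 0))) := by
  induction xs with
  | nil => intro zs ns _ _; simp
  | cons x t ih =>
    intro zs ns hz hn
    by_cases hx : x = 0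
    · subst hx
      have h1 : PySem.List.insertBy (fun a b => decide ((decide (a ≠ 0)) < (decide (b ≠ 0)))) 0 (zs ++ ns)
          = (zs ++ [0]) ++ ns := by
        rw [pv_insertBy_append _ _ _ _ (fun z hzz => by simp [hz z hzz])]
        cases ns with
        | nil => simp [PySem.List.insertBy]
        | cons n nt => simp [PySem.List.insertBy, hn n (by simp)]
      have h2 := ih (zs ++ [0]) ns
        (by intro z hzz; rcases List.mem_append.mp hzz with h | h
            · exact hz z h
            · simpa using h) hn
      simp only [List.foldl_cons, h1, h2]
      simp
    · have h1 : PySem.List.insertBy (fun a b => decide ((decide (a ≠ 0)) < (decide (b ≠ 0)))) x (zs ++ ns)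
          = zs ++ (ns ++ [x]) := by
        rw [PySem.List.insertBy_of_forall_not_before _ _ _ (fun y _ => by simp [hx])]
        simp
      have h2 := ih zs (ns ++ [x]) hz
        (by intro n hnn; rcases List.mem_append.mp hnn with h | h
            · exact hn n h
            · simp at h; omega)
      simp only [List.foldl_cons, h1, h2]
      simp [hx]
  
-- the zeros of a row, as a replicate
theorem pv_filter_zero_eq_replicate (xs : List Int) :
    xs.filter (fun x => decide (x = 0))
      = List.replicate (xs.length - (xs.filter (fun x => decide (x ≠ 0))).length) (0 : Int) := by
  induction xs with
  | nil => simp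
  | cons x t ih =>
    have hle : (t.filter (fun x => decide (x ≠ 0))).length ≤ t.length := List.length_filter_le _ _
    by_cases hx : x = 0
    · subst hx
      have h1 : ((0:Int)::t).filter (fun x => decide (x = 0)) = 0 :: t.filter (fun x => decide (x = 0)) := by simp
      have h2 : ((0:Int)::t).filter (fun x => decide (x ≠ 0)) = t.filter (fun x => decide (x ≠ 0)) := by simp
      rw [h1, h2, ih]
      have h3 : ((0:Int)::t).length - (t.filter (fun x => decide (x ≠ 0))).length
          = (t.length - (t.filter (fun x => decide (x ≠ 0))).length) + 1 := by
        simp only [List.length_cons]; omega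
      rw [h3, List.replicate_succ]
    · have h1 : (x::t).filter (fun x => decide (x = 0)) = t.filter (fun x => decide (x = 0)) := by simp [hx]
      have h2 : (x::t).filter (fun x => decide (x ≠ 0)) = x :: t.filter (fun x => decide (x ≠ 0)) := by simp [hx]
      rw [h1, h2, ih]
      congr 1
      simp only [List.length_cons, List.length_cons]
      omega

-- B's row equals zeros-then-nonzeros
theorem pv_rowB (row : List Int) :
    PySem.List.sorted row (fun x => decide (x ≠ 0)) false
      = List.replicate (row.length - (row.filter (fun x => decide (x ≠ 0))).length) (0 : Int)
        ++ row.filter (fun x => decide (x ≠ 0)) := by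
  rw [PySem.List.sorted_eq_foldl_insertBy]
  have := pv_sort_inv row [] [] (by simp) (by simp)
  simpa [pv_filter_zero_eq_replicate] using this

-- A's prepend-zeros loop
theorem pv_zero_loop (c : Nat) (l : List Int) :
    (PySem.List.pyRange 0 (c : Int) 1).foldl (fun r _ => PySem.List.insert r 0 0) l
      = List.replicate c (0 : Int) ++ l := by
  induction c with
  | zero => simp [PySem.List.pyRange_one_eq_nil (by omega : (0:Int) ≤ 0)]
  | succ k ih =>
    have hcast : ((k + 1 : Nat) : Int) = ((k : Int) + 1) := by push_cast; ring
    rw [hcast, PySem.List.pyRange_one_succ_right (by positivity), List.foldl_append, ih]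
    simp [PySem.List.insert_zero, List.replicate_succ]

-- A's per-row computation
theorem pv_rowA (row : List Int) :
    (PySem.List.pyRange 0
        (PySem.List.len row -
          PySem.List.len ((PySem.List.pyRange 0 (PySem.List.len row) 1).foldl
            (fun r j => if PySem.List.pyGetD row j 0 ≠ 0 then r ++ [PySem.List.pyGetD row j 0] else r) []))
        1).foldl (fun r _ => PySem.List.insert r 0 0)
      ((PySem.List.pyRange 0 (PySem.List.len row) 1).foldl
        (fun r j => if PySem.List.pyGetD row j 0 ≠ 0 then r ++ [PySem.List.pyGetD row j 0] else r) [])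
    = PySem.List.sorted row (fun x => decide (x ≠ 0)) false := by
  have hnz : (PySem.List.pyRange 0 (PySem.List.len row) 1).foldl
      (fun r j => if PySem.List.pyGetD row j 0 ≠ 0 then r ++ [PySem.List.pyGetD row j 0] else r) []
      = row.filter (fun x => decide (x ≠ 0)) := by
    rw [PySem.List.foldl_pyRange_zero_pyGetD row 0
      (fun r v => if v ≠ 0 then r ++ [v] else r) []]
    have := PySem.List.foldl_append_if (fun x : Int => decide (x ≠ 0)) (fun x => x) row []
    simpa using this
  rw [hnz]
  have hle : (row.filter (fun x => decide (x ≠ 0))).length ≤ row.length :=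
    List.length_filter_le _ _
  have hc : (PySem.List.len row - PySem.List.len (row.filter (fun x => decide (x ≠ 0))))
      = ((row.length - (row.filter (fun x => decide (x ≠ 0))).length : Nat) : Int) := by
    simp only [PySem.List.len_eq]
    omega
  rw [hc, pv_zero_loop, pv_rowB]

-- the outer index loop writing new[i] is a map over mat
theorem pv_set_fold (f : List Int → List Int) :
    ∀ (d : Nat) (mat : List (List Int)) (k : Nat) (acc : List (List Int)),
    acc.length = mat.length → k + d = mat.length →
    (PySem.List.pyRange (k : Int) (mat.length : Int) 1).foldl
      (fun a i => a.set i.toNat (f (PySem.List.pyGetD mat i []))) acc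
    = acc.take k ++ (mat.drop k).map f := by
  intro d
  induction d with
  | zero =>
    intro mat k acc hlen hk
    have hkm : k = mat.length := by omega
    subst hkm
    rw [PySem.List.pyRange_one_eq_nil (le_refl _)]
    simp only [List.foldl_nil, List.drop_length, List.map_nil, List.append_nil]
    exact (List.take_of_length_le (by omega)).symm
  | succ e ih =>
    intro mat k acc hlen hk
    have hklt : k < mat.length := by omega
    have hkacc : k < acc.length := by omega
    have hcast : ((k : Int) + 1) = ((k + 1 : Nat) : Int) := by push_cast; ring
    have hget : PySem.List.pyGetD mat (k : Int) [] = mat[k] := by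
      rw [PySem.List.pyGetD_natCast]
      exact List.getD_eq_getElem _ _ hklt
    rw [PySem.List.pyRange_one_cons (by exact_mod_cast hklt), List.foldl_cons, hcast,
      ih mat (k + 1) _ (by simp [hlen]) (by omega)]
    rw [List.drop_eq_getElem_cons hklt]
    simp only [Int.toNat_natCast, hget, List.map_cons]
    rw [List.take_add_one, List.take_set,
      List.set_eq_of_length_le (by rw [List.length_take]; exact Nat.min_le_left _ _)]
    simp [hkacc]

-- ===== VERDICT (by name: the statement is the Claim_ definition above) =====
theorem transfer0_left_spec : Claim_equal_transfer0_left := by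
  intro mat _
  unfold Spec_transfer0_left transfer0_left transfer0_left_alt
  have hbody : ∀ (a : List (List Int)) (i : Int),
      a.set i.toNat ((PySem.List.pyRange 0
          (PySem.List.len (PySem.List.pyGetD mat i []) -
            PySem.List.len ((PySem.List.pyRange 0 (PySem.List.len (PySem.List.pyGetD mat i [])) 1).foldl
              (fun r j => if PySem.List.pyGetD (PySem.List.pyGetD mat i []) j 0 ≠ 0 then
                  r ++ [PySem.List.pyGetD (PySem.List.pyGetD mat i []) j 0] else r) []))
          1).foldl (fun r _ => PySem.List.insert r 0 0)
        ((PySem.List.pyRange 0 (PySem.List.len (PySem.List.pyGetD mat i [])) 1).foldl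
          (fun r j => if PySem.List.pyGetD (PySem.List.pyGetD mat i []) j 0 ≠ 0 then
              r ++ [PySem.List.pyGetD (PySem.List.pyGetD mat i []) j 0] else r) []))
      = a.set i.toNat (PySem.List.sorted (PySem.List.pyGetD mat i []) (fun x => decide (x ≠ 0)) false) := by
    intro a i
    exact congrArg _ (pv_rowA (PySem.List.pyGetD mat i []))
  simp only [hbody]
  rw [PySem.List.len_eq]
  have hmap := pv_set_fold (fun row => PySem.List.sorted row (fun x => decide (x ≠ 0)) false)
    mat.length mat 0 (List.replicate mat.length (List.replicate mat.length (0 : Int)))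
    (by simp) (by omega)
  simp only [Int.natCast_zero, List.take_zero, List.drop_zero, List.nil_append] at hmap
  rw [hmap]
  congr 1
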